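-- pv_equiv track=rewrite | github.com/Doorcreator/Bookshelf | testfd/ALG009 dial a name.py | dial_all
-- ===== SOURCE A (Python) =====
-- key_index = {2:'abc',3:'def',4:'ghi',
-- 			 5:'jkl',6:'mno',7:'pqr',
-- 			 8:'stu',9:'vwx',0:'yz '}
--
-- def dial(name_array,dial_num,dial_order):
-- 	temp = set()
-- 	key_list = [e for e in key_index[dial_num]]
-- 	for name in name_array:
-- 		for key in key_list:
-- 			try:
-- 				if name[dial_order].lower() == key:
-- 					temp.add(name)
-- 			except:
-- 				break
-- 	return temp
--
-- def dial_all(name_array,dial_nums):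
-- 	i=0
-- 	num = str(dial_nums)
-- 	while True:
-- 		r = dial(name_array,int(num[i]),i)
-- 		name_array = r
-- 		i+=1
-- 		if i >= len(num):
-- 			break
-- 	return name_array
-- ===== SOURCE B (Python) =====
-- key_index = {2:'abc',3:'def',4:'ghi',
--              5:'jkl',6:'mno',7:'pqr',
--              8:'stu',9:'vwx',0:'yz '}
--
-- def dial_all(name_array, dial_nums):
--     num = str(dial_nums)
--     groups = [key_index[int(d)] for d in num]
--     out = set()
--     for name in name_array:
--         if len(name) >= len(num) and all(ch.lower() in g for ch, g in zip(name, groups)):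
--             out.add(name)
--     return out
-- ===== Notes on version B (the rewrite author's own statement) =====
-- stated objective: simpler
-- what changed: B precomputes the keypad group for every digit once and makes a single pass over name_array testing all positions at once, instead of A's one full filtering pass over the (shrinking) name collection per digit.
import Mathlib
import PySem

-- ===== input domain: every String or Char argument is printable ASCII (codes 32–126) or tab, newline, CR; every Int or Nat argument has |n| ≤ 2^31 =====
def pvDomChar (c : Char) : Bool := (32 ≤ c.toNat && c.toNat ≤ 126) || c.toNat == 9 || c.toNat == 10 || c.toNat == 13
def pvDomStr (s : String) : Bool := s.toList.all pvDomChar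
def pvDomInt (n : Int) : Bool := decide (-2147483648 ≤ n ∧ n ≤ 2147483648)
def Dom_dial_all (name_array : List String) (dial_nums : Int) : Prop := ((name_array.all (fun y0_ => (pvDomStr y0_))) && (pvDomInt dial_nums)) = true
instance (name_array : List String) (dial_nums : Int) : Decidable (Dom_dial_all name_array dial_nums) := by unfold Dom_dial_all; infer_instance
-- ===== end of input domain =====

-- B replaces A's digit-by-digit filtering passes by ONE pass over name_array testing all keypad
-- groups at once (objective: simpler). Both programs return a Python set, modelled as a
-- duplicate-free list (PySem.Set String).

-- ===== PORT A =====
def key_index : PySem.Dict Int String :=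
  PySem.Dict.ofList [(2,"abc"),(3,"def"),(4,"ghi"),(5,"jkl"),(6,"mno"),(7,"pqr"),(8,"stu"),(9,"vwx"),(0,"yz ")]

-- inner 'for key in key_list' loop; the bare except catches the IndexError of name[dial_order] and breaks
def dialKeys (temp : PySem.Set String) (name : String) (dial_order : Int) : List Char → PySem.Set String
  | [] => temp
  | key :: rest =>
    match PySem.Str.pyGet? name dial_order with
    | none => temp
    | some c =>
      dialKeys (if PySem.Chars.lowerChar c == key then PySem.Set.add temp name else temp) name dial_order rest

def dial (name_array : List String) (dial_num : Int) (dial_order : Int) : Option (PySem.Set String) :=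
  match key_index.get? dial_num with
  | none => none  -- KeyError key_index[dial_num]
  | some ks =>
    some (name_array.foldl (fun temp name => dialKeys temp name dial_order ks.toList) PySem.Set.empty)

-- the 'while True' loop over i = 0 .. len(num)-1
def dialWhile (name_array : List String) : List (Int × Char) → Option (List String)
  | [] => some name_array
  | (i, c) :: rest =>
    match PySem.Int.ofChars? [c] with
    | none => none  -- ValueError from int(num[i])
    | some d =>
      match dial name_array d i with
      | none => none
      | some r => dialWhile r rest

def dial_all (name_array : List String) (dial_nums : Int) : List String :=
  (dialWhile name_array (PySem.List.enumerate (PySem.Int.toChars dial_nums) 0)).getD []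

-- ===== PORT B =====
-- groups = [key_index[int(d)] for d in num]  (first bad digit raises, like A)
def groupsOf : List Char → Option (List (List Char))
  | [] => some []
  | c :: rest =>
    match PySem.Int.ofChars? [c] with
    | none => none
    | some d =>
      match key_index.get? d with
      | none => none
      | some g =>
        match groupsOf rest with
        | none => none
        | some gs => some (g.toList :: gs)

def dial_all_alt (name_array : List String) (dial_nums : Int) : List String :=
  let num := PySem.Int.toChars dial_nums
  match groupsOf num with
  | none => []  -- B raises here exactly like A; excluded by Pre_
  | some gs =>
    name_array.foldl (fun out name =>
      if decide (num.length ≤ name.toList.length) &&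
         ((name.toList.zip gs).all fun p => p.2.contains (PySem.Chars.lowerChar p.1))
      then PySem.Set.add out name else out) PySem.Set.empty

-- ===== PRECONDITION & SPEC =====
-- Pre_ excludes exactly the inputs on which A raises (and B raises too): negative dial_nums
-- (ValueError from int('-')) and numbers containing the digit 1 (KeyError in key_index).
def Pre_dial_all (name_array : List String) (dial_nums : Int) : Prop :=
  0 ≤ dial_nums ∧ '1' ∉ PySem.Int.toChars dial_nums
instance (name_array : List String) (dial_nums : Int) : Decidable (Pre_dial_all name_array dial_nums) := by unfold Pre_dial_all; infer_instance

def pvWitness_dial_all : List String × Int := (["ade", "xyz", "ad"], 23)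

def Spec_dial_all (name_array : List String) (dial_nums : Int) (out : List String) : Prop := out = dial_all_alt name_array dial_nums
instance (name_array : List String) (dial_nums : Int) (out : List String) : Decidable (Spec_dial_all name_array dial_nums out) := by unfold Spec_dial_all; infer_instance

-- ===== CLAIM (what is proved, stated in full; the proofs are below) =====
def Claim_equal_dial_all : Prop := ∀ (name_array : List String) (dial_nums : Int), Dom_dial_all name_array dial_nums → Pre_dial_all name_array dial_nums → Spec_dial_all name_array dial_nums (dial_all name_array dial_nums)

-- ===== LEMMAS AND PROOFS =====

-- the per-position predicate A's stage i implements
def predA (name : String) (i : Int) (g : List Char) : Bool :=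
  match PySem.Str.pyGet? name i with
  | none => false
  | some c => g.contains (PySem.Chars.lowerChar c)

-- the keypad group of a digit character (proof-side view of key_index[int(c)])
def gOf (c : Char) : List Char :=
  (((PySem.Int.ofChars? [c]).bind key_index.get?).getD "").toList

-- a digit character on which A's lookups succeed
def good (c : Char) : Prop := ((PySem.Int.ofChars? [c]).bind key_index.get?).isSome = true

-- conjunction of A's stage predicates from position k on
def predSuf (name : String) : List Char → Int → Bool
  | [], _ => true
  | c :: rest, k => predA name k (gOf c) && predSuf name rest (k + 1)

theorem set_add_idem {α : Type} [BEq α] [LawfulBEq α] (s : PySem.Set α) (a : α) :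
    PySem.Set.add (PySem.Set.add s a) a = PySem.Set.add s a := by
  by_cases h : a ∈ s
  · simp [PySem.Set.add, h]
  · simp [PySem.Set.add, h]

theorem dialKeys_eq (temp : PySem.Set String) (name : String) (i : Int) (keys : List Char) :
    dialKeys temp name i keys = if predA name i keys then PySem.Set.add temp name else temp := by
  induction keys generalizing temp with
  | nil =>
    cases hg : PySem.List.pyGet? name.toList i <;>
      simp [dialKeys, predA, PySem.Str.pyGet?_eq, PySem.Chars.pyGet?, hg]
  | cons key rest ih =>
    cases hg : PySem.List.pyGet? name.toList i with
    | none => simp [dialKeys, predA, PySem.Str.pyGet?_eq, PySem.Chars.pyGet?, hg]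
    | some c =>
      by_cases hk : PySem.Chars.lowerChar c = key
      · subst hk
        simp only [dialKeys, predA, PySem.Str.pyGet?_eq, PySem.Chars.pyGet?, hg,
          beq_self_eq_true, if_true, ih, List.contains_cons, Bool.true_or]
        cases h : rest.contains (PySem.Chars.lowerChar c) <;> simp [set_add_idem]
      · have h1 : (PySem.Chars.lowerChar c == key) = false := by simp [hk]
        have h2 : (key == PySem.Chars.lowerChar c) = false := by simp [Ne.symm hk]
        simp only [dialKeys, predA, PySem.Str.pyGet?_eq, PySem.Chars.pyGet?, hg, h1,
          Bool.false_eq_true, if_false, ih, List.contains_cons, h2, Bool.false_or]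

theorem filter_set_add {α : Type} [BEq α] [LawfulBEq α] (q : α → Bool) (s : PySem.Set α) (a : α) :
    (PySem.Set.add s a).filter q = if q a then PySem.Set.add (s.filter q) a else s.filter q := by
  by_cases ha : a ∈ s
  · by_cases hq : q a
    · have hm : a ∈ s.filter q := List.mem_filter.mpr ⟨ha, hq⟩
      simp [PySem.Set.add, ha, hq, hm]
    · simp [PySem.Set.add, ha, hq]
  · by_cases hq : q a
    · have hm : a ∉ s.filter q := fun hmem => ha (List.mem_filter.mp hmem).1
      simp [PySem.Set.add, ha, hq, hm, List.filter_append]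
    · simp [PySem.Set.add, ha, hq, List.filter_append]

theorem filter_foldl_add {α : Type} [BEq α] [LawfulBEq α] (q : α → Bool) :
    ∀ (l : List α) (s : PySem.Set α),
      (l.foldl PySem.Set.add s).filter q = (l.filter q).foldl PySem.Set.add (s.filter q) := by
  intro l
  induction l with
  | nil => intro s; simp
  | cons a t ih =>
    intro s
    simp only [List.foldl_cons, ih, filter_set_add, List.filter_cons]
    by_cases hq : q a <;> simp [hq]

theorem filter_ofList {α : Type} [BEq α] [LawfulBEq α] (q : α → Bool) (l : List α) :
    (PySem.Set.ofList l).filter q = PySem.Set.ofList (l.filter q) := by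
  rw [PySem.Set.ofList_eq_foldl, PySem.Set.ofList_eq_foldl, filter_foldl_add]
  rfl

theorem dial_eq (arr : List String) (d i : Int) (ks : String) (h : key_index.get? d = some ks) :
    dial arr d i = some (PySem.Set.ofList (arr.filter (fun n => predA n i ks.toList))) := by
  simp only [dial, h]
  congr 1
  simp only [dialKeys_eq]
  rw [PySem.Set.ofList_eq_foldl, List.foldl_filter]
  rfl

theorem good_group (c : Char) (h : good c) :
    ∃ (d : Int) (g : String), PySem.Int.ofChars? [c] = some d ∧
      key_index.get? d = some g ∧ g.toList = gOf c := by
  unfold good at h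
  cases hd : PySem.Int.ofChars? [c] with
  | none => simp [hd] at h
  | some d =>
    cases hg : key_index.get? d with
    | none => simp [hd, hg] at h
    | some g => exact ⟨d, g, rfl, hg, by simp [gOf, hd, hg]⟩

theorem loop_tail :
    ∀ (cs : List Char) (k : Int) (s : List String), (∀ c ∈ cs, good c) → s.Nodup →
      dialWhile s (PySem.List.enumerate cs k) =
        some (s.filter (fun n => predSuf n cs k)) := by
  intro cs
  induction cs with
  | nil => intro k s _ _; simp [PySem.List.enumerate, dialWhile, predSuf]
  | cons c rest ih =>
    intro k s hgood hnd
    obtain ⟨d, g, hd, hk, hg⟩ := good_group c (hgood c (by simp))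
    have hdial := dial_eq s d k g hk
    simp only [PySem.List.enumerate, dialWhile, hd, hdial, hg]
    rw [PySem.Set.ofList_eq_self_of_nodup _ (hnd.filter _)]
    rw [ih (k+1) _ (fun c' hc' => hgood c' (by simp [hc'])) (hnd.filter _)]
    rw [List.filter_filter]
    congr 1
    apply List.filter_congr
    intro x _
    simp [predSuf, Bool.and_comm]

theorem toChars_nonneg (n : Int) (h : 0 ≤ n) :
    PySem.Int.toChars n = Nat.toDigits 10 n.toNat := by
  simp [PySem.Int.toChars, Int.not_lt.mpr h]

theorem mem_digits (c : Char) (h : c.isDigit = true) :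
    c ∈ ['0','1','2','3','4','5','6','7','8','9'] := by
  have h1 : 48 ≤ c.toNat ∧ c.toNat ≤ 57 := by
    simp [Char.isDigit] at h; exact ⟨h.1, h.2⟩
  obtain ⟨a, b⟩ := h1
  have : c.toNat = 48 ∨ c.toNat = 49 ∨ c.toNat = 50 ∨ c.toNat = 51 ∨ c.toNat = 52 ∨
      c.toNat = 53 ∨ c.toNat = 54 ∨ c.toNat = 55 ∨ c.toNat = 56 ∨ c.toNat = 57 := by omega
  rcases this with h|h|h|h|h|h|h|h|h|h <;>
    · have hc : c = Char.ofNat c.toNat := by simp [Char.ofNat_toNat]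
      rw [h] at hc
      subst hc
      decide

theorem good_of_digit (c : Char) (h : c.isDigit = true) (h1 : c ≠ '1') : good c := by
  have := mem_digits c h
  fin_cases this <;> first | (exact absurd rfl h1) | (unfold good key_index; decide)

-- B's closed form
theorem alt_eq (arr : List String) (num : List Char) (gs : List (List Char))
    (h : groupsOf num = some gs) :
    (match groupsOf num with
      | none => []
      | some gs =>
        arr.foldl (fun out name =>
          if decide (num.length ≤ name.toList.length) &&
             ((name.toList.zip gs).all fun p => p.2.contains (PySem.Chars.lowerChar p.1))
          then PySem.Set.add out name else out) PySem.Set.empty : List String) =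
      PySem.Set.ofList (arr.filter (fun name =>
        decide (num.length ≤ name.toList.length) &&
          ((name.toList.zip gs).all fun p => p.2.contains (PySem.Chars.lowerChar p.1)))) := by
  simp only [h]
  rw [PySem.Set.ofList_eq_foldl, List.foldl_filter]
  rfl

theorem groupsOf_eq (cs : List Char) (h : ∀ c ∈ cs, good c) :
    groupsOf cs = some (cs.map gOf) := by
  induction cs with
  | nil => simp [groupsOf]
  | cons c rest ih =>
    obtain ⟨d, g, hd, hk, hg⟩ := good_group c (h c (by simp))
    simp only [groupsOf, hd, hk, ih (fun c' hc' => h c' (by simp [hc'])), List.map_cons, hg]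

theorem predSuf_out (name : String) :
    ∀ (cs : List Char) (j : Nat), name.toList.length < j + cs.length →
      j ≤ name.toList.length → predSuf name cs (j : Int) = false := by
  intro cs
  induction cs with
  | nil => intro j h1 h2; simp only [List.length_nil] at h1; omega
  | cons c rest ih =>
    intro j h1 h2
    by_cases hj : j < name.toList.length
    · have hcast : ((j : Int) + 1) = ((j + 1 : Nat) : Int) := by push_cast; ring
      have hih : predSuf name rest ((j + 1 : Nat) : Int) = false :=
        ih (j + 1) (by simp only [List.length_cons] at h1; omega) (by omega)
      rw [show predSuf name (c :: rest) (j : Int) =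
            (predA name (j : Int) (gOf c) && predSuf name rest ((j : Int) + 1)) from rfl,
          hcast, hih, Bool.and_false]
    · have hj' : j = name.toList.length := by omega
      have hnone : name.toList[j]? = none := by rw [hj']; simp
      simp [predSuf, predA, PySem.Str.pyGet?_eq, PySem.Chars.pyGet?,
        PySem.List.pyGet?_natCast, hnone]

theorem predSuf_in (name : String) :
    ∀ (cs : List Char) (j : Nat), j + cs.length ≤ name.toList.length →
      predSuf name cs (j : Int) =
        ((name.toList.drop j).zip (cs.map gOf)).all
          (fun p => p.2.contains (PySem.Chars.lowerChar p.1)) := by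
  intro cs
  induction cs with
  | nil => intro j h; simp [predSuf]
  | cons c rest ih =>
    intro j h
    have hj : j < name.toList.length := by simp only [List.length_cons] at h; omega
    have hget : name.toList[j]? = some (name.toList[j]) := by simp [hj]
    have hcast : ((j : Int) + 1) = ((j + 1 : Nat) : Int) := by push_cast; ring
    have hih := ih (j + 1) (by simp only [List.length_cons] at h; omega)
    rw [show predSuf name (c :: rest) (j : Int) =
          (predA name (j : Int) (gOf c) && predSuf name rest ((j : Int) + 1)) from rfl,
        hcast, hih, List.drop_eq_getElem_cons hj]
    simp only [predA, PySem.Str.pyGet?_eq, PySem.Chars.pyGet?, PySem.List.pyGet?_natCast,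
      hget, List.map_cons, List.zip_cons_cons, List.all_cons]

theorem pred_eq (name : String) (cs : List Char) :
    predSuf name cs 0 =
      (decide (cs.length ≤ name.toList.length) &&
        ((name.toList.zip (cs.map gOf)).all fun p => p.2.contains (PySem.Chars.lowerChar p.1))) := by
  by_cases h : cs.length ≤ name.toList.length
  · have hin := predSuf_in name cs 0 (by omega)
    simp only [Nat.cast_zero, List.drop_zero] at hin
    rw [hin, decide_eq_true h, Bool.true_and]
  · have hout := predSuf_out name cs 0 (by omega) (by omega)
    simp only [Nat.cast_zero] at hout
    rw [hout, decide_eq_false h, Bool.false_and]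

-- ===== VERDICT (by name: the statement is the Claim_ definition above) =====
theorem dial_all_spec : Claim_equal_dial_all := by
  intro name_array dial_nums _ hpre
  obtain ⟨hnn, h1⟩ := hpre
  unfold Spec_dial_all
  have hgood : ∀ c ∈ PySem.Int.toChars dial_nums, good c := by
    intro c hc
    refine good_of_digit c ?_ ?_
    · rw [toChars_nonneg _ hnn] at hc
      exact Nat.isDigit_of_mem_toDigits (by norm_num) (by norm_num) hc
    · intro he; exact h1 (he ▸ hc)
  have hne : PySem.Int.toChars dial_nums ≠ [] := by
    rw [toChars_nonneg _ hnn]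
    have := @Nat.length_toDigits_pos 10 dial_nums.toNat
    intro he; rw [he] at this; simp at this
  cases hnum : PySem.Int.toChars dial_nums with
  | nil => exact absurd hnum hne
  | cons c0 rest =>
    rw [hnum] at hgood
    obtain ⟨d, g, hd, hk, hg⟩ := good_group c0 (hgood c0 (by simp))
    have hdial := dial_eq name_array d 0 g hk
    unfold dial_all dial_all_alt
    rw [hnum]
    simp only [PySem.List.enumerate, dialWhile, hd, hdial, hg]
    rw [loop_tail rest (0 + 1) _ (fun c' hc' => hgood c' (by simp [hc'])) (PySem.Set.nodup_ofList _)]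
    rw [filter_ofList]
    rw [alt_eq name_array (c0 :: rest) _ (groupsOf_eq _ hgood)]
    simp only [Option.getD_some]
    rw [List.filter_filter]
    congr 1
    apply List.filter_congr
    intro n _
    rw [← pred_eq]
    simp [predSuf, Bool.and_comm]
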